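-- pv_equiv track=rewrite | github.com/lockephi/Allentown-L104-Node | l104_quantum_networker/qkd.py | _cascade_error_correct
-- ===== SOURCE A (Python) =====
-- from typing import Dict, List, Optional, Tuple
--
-- def _cascade_error_correct(alice_bits: List[int], bob_bits: List[int]) -> List[int]:
--     """Simple CASCADE-style error correction.
--
--     Divides bits into blocks and uses parity checks to identify/correct errors.
--     """
--     corrected = list(alice_bits)
--     block_size = max(3, len(alice_bits) // 8)
--
--     for start in range(0, len(corrected) - block_size + 1, block_size):
--         end = min(start + block_size, len(corrected))
--         parity_a = sum(corrected[start:end]) % 2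
--         parity_b = sum(bob_bits[start:end]) % 2 if end <= len(bob_bits) else parity_a
--
--         if parity_a != parity_b and end - start > 0:
--             # Binary search for the error within this block
--             lo, hi = start, end - 1
--             while lo < hi:
--                 mid = (lo + hi) // 2
--                 pa = sum(corrected[lo:mid + 1]) % 2
--                 pb = sum(bob_bits[lo:mid + 1]) % 2 if mid + 1 <= len(bob_bits) else pa
--                 if pa != pb:
--                     hi = mid
--                 else:
--                     lo = mid + 1
--             corrected[lo] = 1 - corrected[lo]  # Flip the error bit
--
--     return corrected
-- ===== SOURCE B (Python) =====
-- from typing import Dict, List, Optional, Tuple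
--
-- def _cascade_error_correct(alice_bits: List[int], bob_bits: List[int]) -> List[int]:
--     """CASCADE-style error correction via prefix sums.
--
--     Precomputes prefix sums of both bit strings once, so every block-parity
--     check and every bisection step is O(1) instead of an O(block) slice sum.
--     Flips never touch bits at or beyond the block being examined, so the
--     original prefix sums stay valid throughout.
--     """
--     n = len(alice_bits)
--     m = len(bob_bits)
--     block_size = max(3, n // 8)
--     da = [0]
--     acc = 0
--     for x in alice_bits:
--         acc += x
--         da.append(acc)
--     db = [0]
--     acc = 0
--     for x in bob_bits:
--         acc += x
--         db.append(acc)
--     out = list(alice_bits)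
--     for start in range(0, n - block_size + 1, block_size):
--         end = start + block_size  # start + block_size <= n for every start in the range
--         if end > m:
--             continue  # no bob parity available: block is left untouched
--         if (da[end] - da[start] + db[end] - db[start]) % 2 == 0:
--             continue  # parities agree
--         lo, hi = start, end - 1
--         while lo < hi:
--             mid = (lo + hi) // 2
--             if (da[mid + 1] - da[lo] + db[mid + 1] - db[lo]) % 2:
--                 hi = mid
--             else:
--                 lo = mid + 1
--         out[lo] = 1 - out[lo]
--     return out
-- ===== Notes on version B (the rewrite author's own statement) =====
-- stated objective: alternative
-- what changed: B precomputes prefix-sum lists of alice_bits and bob_bits once and answers every block-parity check and every bisection step with an O(1) prefix-difference, instead of A's re-slicing and re-summing the lists at each check; flips are provably outside every range still to be examined, so the prefix sums built from the originals stay exact.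
import Mathlib
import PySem

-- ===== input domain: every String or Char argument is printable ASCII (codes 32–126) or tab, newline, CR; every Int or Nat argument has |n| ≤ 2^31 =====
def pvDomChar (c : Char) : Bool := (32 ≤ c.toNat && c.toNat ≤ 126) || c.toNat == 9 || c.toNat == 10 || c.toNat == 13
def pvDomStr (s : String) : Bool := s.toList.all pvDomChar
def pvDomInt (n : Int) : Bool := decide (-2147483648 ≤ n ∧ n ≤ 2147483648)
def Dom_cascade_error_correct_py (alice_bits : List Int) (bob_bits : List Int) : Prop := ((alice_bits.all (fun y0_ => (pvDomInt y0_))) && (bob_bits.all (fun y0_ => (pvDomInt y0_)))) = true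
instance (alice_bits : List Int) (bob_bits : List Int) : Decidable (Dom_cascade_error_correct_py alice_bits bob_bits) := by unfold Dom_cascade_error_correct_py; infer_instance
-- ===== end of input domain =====

-- B replaces A's repeated slice-summing (block parities and every bisection step re-sum a
-- slice) by two prefix-sum lists built once, making each parity check O(1); same results.

-- ===== PORT A =====
-- the inner `while lo < hi` binary search of A, step for step
def pvASearch (corrected bob_bits : List Int) (lo hi : Int) : Int :=
  if h : lo < hi then
    let mid := PySem.Int.floordiv (lo + hi) 2
    let pa := PySem.Int.mod (PySem.List.slice corrected (some lo) (some (mid + 1))).sum 2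
    let pb := if mid + 1 ≤ (bob_bits.length : Int)
      then PySem.Int.mod (PySem.List.slice bob_bits (some lo) (some (mid + 1))).sum 2
      else pa
    if pa ≠ pb then pvASearch corrected bob_bits lo mid
    else pvASearch corrected bob_bits (mid + 1) hi
  else lo
termination_by (hi - lo).toNat
decreasing_by
  · have h2 : PySem.Int.floordiv (lo + hi) 2 < hi :=
      (PySem.Int.floordiv_lt_iff_lt_mul (by norm_num)).mpr (by omega)
    omega
  · have h1 := PySem.Int.floordiv_two_mid_bounds (le_of_lt h)
    omega

-- one iteration of A's `for start in range(...)` loop body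
def pvAStep (bob_bits : List Int) (block_size : Int) (corrected : List Int) (start : Int) : List Int :=
  let end_ := min (start + block_size) (corrected.length : Int)
  let parity_a := PySem.Int.mod (PySem.List.slice corrected (some start) (some end_)).sum 2
  let parity_b := if end_ ≤ (bob_bits.length : Int)
    then PySem.Int.mod (PySem.List.slice bob_bits (some start) (some end_)).sum 2
    else parity_a
  if parity_a ≠ parity_b ∧ end_ - start > 0 then
    let lo := pvASearch corrected bob_bits start (end_ - 1)
    -- corrected[lo] = 1 - corrected[lo]; lo is always in range here, so the total forms are exact
    PySem.List.pySetD corrected lo (1 - PySem.List.pyGetD corrected lo 0)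
  else corrected

def cascade_error_correct_py (alice_bits : List Int) (bob_bits : List Int) : List Int :=
  let corrected := alice_bits
  let block_size : Int := max 3 (PySem.Int.floordiv (alice_bits.length : Int) 8)
  (PySem.List.pyRange 0 ((corrected.length : Int) - block_size + 1) block_size).foldl
    (pvAStep bob_bits block_size) corrected

-- ===== PORT B =====
-- da = [0]; acc = 0; for x in xs: acc += x; da.append(acc)
def pvPrefix (xs : List Int) : List Int :=
  (xs.foldl (fun (s : List Int × Int) x =>
      let acc := s.2 + x
      (s.1 ++ [acc], acc)) ([0], 0)).1

-- B's `while lo < hi` bisection with O(1) prefix-sum parity checks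
-- (all list indices are in range here, so the total indexing form is exact)
def pvBSearch (da db : List Int) (lo hi : Int) : Int :=
  if h : lo < hi then
    let mid := PySem.Int.floordiv (lo + hi) 2
    if PySem.Int.mod (PySem.List.pyGetD da (mid + 1) 0 - PySem.List.pyGetD da lo 0
        + PySem.List.pyGetD db (mid + 1) 0 - PySem.List.pyGetD db lo 0) 2 ≠ 0 then
      pvBSearch da db lo mid
    else pvBSearch da db (mid + 1) hi
  else lo
termination_by (hi - lo).toNat
decreasing_by
  · have h2 : PySem.Int.floordiv (lo + hi) 2 < hi :=
      (PySem.Int.floordiv_lt_iff_lt_mul (by norm_num)).mpr (by omega)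
    omega
  · have h1 := PySem.Int.floordiv_two_mid_bounds (le_of_lt h)
    omega

-- one iteration of B's block loop body
def pvBStep (da db : List Int) (m block_size : Int) (out : List Int) (start : Int) : List Int :=
  let end_ := start + block_size
  if end_ > m then out
  else if PySem.Int.mod (PySem.List.pyGetD da end_ 0 - PySem.List.pyGetD da start 0
      + PySem.List.pyGetD db end_ 0 - PySem.List.pyGetD db start 0) 2 = 0 then out
  else
    let lo := pvBSearch da db start (end_ - 1)
    PySem.List.pySetD out lo (1 - PySem.List.pyGetD out lo 0)

def cascade_error_correct_py_alt (alice_bits : List Int) (bob_bits : List Int) : List Int :=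
  let n : Int := alice_bits.length
  let m : Int := bob_bits.length
  let block_size : Int := max 3 (PySem.Int.floordiv n 8)
  let da := pvPrefix alice_bits
  let db := pvPrefix bob_bits
  let out := alice_bits
  (PySem.List.pyRange 0 (n - block_size + 1) block_size).foldl
    (pvBStep da db m block_size) out

-- ===== PRECONDITION & SPEC =====
def Spec_cascade_error_correct_py (alice_bits : List Int) (bob_bits : List Int) (out : List Int) : Prop := out = cascade_error_correct_py_alt alice_bits bob_bits
instance (alice_bits : List Int) (bob_bits : List Int) (out : List Int) : Decidable (Spec_cascade_error_correct_py alice_bits bob_bits out) := by unfold Spec_cascade_error_correct_py; infer_instance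

-- ===== CLAIM (what is proved, stated in full; the proofs are below) =====
def Claim_equal_cascade_error_correct_py : Prop := ∀ (alice_bits : List Int) (bob_bits : List Int), Dom_cascade_error_correct_py alice_bits bob_bits → Spec_cascade_error_correct_py alice_bits bob_bits (cascade_error_correct_py alice_bits bob_bits)

-- ===== LEMMAS AND PROOFS =====

-- pyRange with a positive step, in cons/nil induction form
theorem pvRange_pos_nil (a b st : Int) (hst : 0 < st) (hab : b ≤ a) :
    PySem.List.pyRange a b st = [] := by
  rw [PySem.List.pyRange_of_pos _ _ hst, if_neg (by omega)]
  simp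

theorem pvRange_pos_cons (a b st : Int) (hst : 0 < st) (hab : a < b) :
    PySem.List.pyRange a b st = a :: PySem.List.pyRange (a + st) b st := by
  rw [PySem.List.pyRange_of_pos _ _ hst, PySem.List.pyRange_of_pos _ _ hst,
    if_pos hab]
  by_cases h2 : a + st < b
  · rw [if_pos h2]
    have hq : (b - a + st - 1) / st = (b - (a + st) + st - 1) / st + 1 := by
      have := Int.add_mul_ediv_right (b - a - 1) 1 (by omega : st ≠ 0)
      have e1 : b - a + st - 1 = b - a - 1 + 1 * st := by ring
      have e2 : b - (a + st) + st - 1 = b - a - 1 := by ring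
      rw [e1, e2, this]
    have hnn : 0 ≤ (b - (a + st) + st - 1) / st := Int.ediv_nonneg (by omega) (by omega)
    rw [hq]
    have ht : ((b - (a + st) + st - 1) / st + 1).toNat = ((b - (a + st) + st - 1) / st).toNat + 1 := by omega
    rw [ht, List.range_succ_eq_map]
    simp only [List.map_cons, List.map_map]
    congr 1
    · ring
    · apply List.map_congr_left
      intro k _
      simp [Function.comp]
      ring
  · rw [if_neg h2]
    have h1 : 1 * st ≤ b - a + st - 1 := by omega
    have hlt : b - a + st - 1 < 2 * st := by omega
    have hge : 1 ≤ (b - a + st - 1) / st := by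
      rw [Int.le_ediv_iff_mul_le hst]; omega
    have hl2 : (b - a + st - 1) / st < 2 := by
      rw [Int.ediv_lt_iff_lt_mul hst]; omega
    have : ((b - a + st - 1) / st).toNat = 1 := by omega
    rw [this]
    simp

theorem pvPrefix_go (xs : List Int) : ∀ (p : List Int) (acc : Int),
    (xs.foldl (fun (s : List Int × Int) x =>
      let acc := s.2 + x
      (s.1 ++ [acc], acc)) (p, acc)).1
    = p ++ (List.range xs.length).map (fun k => acc + (xs.take (k + 1)).sum) := by
  induction xs with
  | nil => intro p acc; simp
  | cons x xs ih =>
    intro p acc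
    simp only [List.foldl_cons]
    rw [ih]
    simp only [List.length_cons, List.range_succ_eq_map, List.map_cons, List.map_map]
    simp only [List.take_succ_cons, List.sum_cons, List.append_assoc]
    congr 1
    simp only [List.take_zero, List.sum_nil, List.singleton_append, List.cons.injEq]
    constructor
    · ring
    · apply List.map_congr_left
      intro k _
      simp [Function.comp]
      ring

theorem pvPrefix_eq (xs : List Int) :
    pvPrefix xs = 0 :: (List.range xs.length).map (fun k => (xs.take (k + 1)).sum) := by
  unfold pvPrefix
  rw [pvPrefix_go]
  simp

theorem pvPrefix_pyGetD (xs : List Int) (i : Int) (h0 : 0 ≤ i) (h1 : i ≤ (xs.length : Int)) :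
    PySem.List.pyGetD (pvPrefix xs) i 0 = (xs.take i.toNat).sum := by
  have hlen : (pvPrefix xs).length = xs.length + 1 := by
    rw [pvPrefix_eq]; simp
  rw [PySem.List.pyGetD_eq_getElem _ _ h0 (by omega)]
  rw [List.getElem_of_eq (pvPrefix_eq xs) (by omega)]
  rcases Nat.eq_zero_or_pos i.toNat with hz | hp
  · simp [hz]
  · have hi : i.toNat = (i.toNat - 1) + 1 := by omega
    rw [List.getElem_cons]
    split
    · omega
    · simp only [List.getElem_map, List.getElem_range]
      rw [← hi]

theorem pvSliceSum (xs : List Int) (a b : Int) (h0 : 0 ≤ a) (hab : a ≤ b) :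
    (PySem.List.slice xs (some a) (some b)).sum
      = (xs.take b.toNat).sum - (xs.take a.toNat).sum := by
  rw [PySem.List.slice_toNat _ h0 (by omega)]
  have h : xs.take b.toNat = xs.take a.toNat ++ (xs.drop a.toNat).take (b.toNat - a.toNat) := by
    rw [← List.take_add]; congr 1; omega
  rw [h, List.sum_append]
  ring

theorem pvSliceAgree (c al : List Int) (s : Nat) (h : c.drop s = al.drop s)
    (a b : Int) (ha : (s : Int) ≤ a) (hb : 0 ≤ b) :
    PySem.List.slice c (some a) (some b) = PySem.List.slice al (some a) (some b) := by
  have h0 : (0:Int) ≤ a := by omega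
  rw [PySem.List.slice_toNat _ h0 hb, PySem.List.slice_toNat _ h0 hb]
  have hone : ∀ (l : List Int), l.drop a.toNat = (l.drop s).drop (a.toNat - s) := by
    intro l; rw [List.drop_drop]; congr 1; omega
  rw [hone c, hone al, h]

theorem pvDropAgreeMono (c al : List Int) (s t : Nat) (hst : s ≤ t)
    (h : c.drop s = al.drop s) : c.drop t = al.drop t := by
  have hone : ∀ (l : List Int), l.drop t = (l.drop s).drop (t - s) := by
    intro l; rw [List.drop_drop]; congr 1; omega
  rw [hone c, hone al, h]

theorem pvBSearch_bounds (da db : List Int) :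
    ∀ (n : Nat) (lo hi : Int), (hi - lo).toNat = n → lo ≤ hi →
      lo ≤ pvBSearch da db lo hi ∧ pvBSearch da db lo hi ≤ hi := by
  intro n
  induction n using Nat.strong_induction_on with
  | _ n ih =>
    intro lo hi hn hle
    rw [pvBSearch]
    by_cases h : lo < hi
    · rw [dif_pos h]
      simp only []
      have hmb := PySem.Int.floordiv_two_mid_bounds (le_of_lt h)
      have hmlt : PySem.Int.floordiv (lo + hi) 2 < hi :=
        (PySem.Int.floordiv_lt_iff_lt_mul (by norm_num)).mpr (by omega)
      split
      · have := ih ((PySem.Int.floordiv (lo + hi) 2 - lo).toNat) (by omega) lo _ rfl (by omega)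
        omega
      · have := ih ((hi - (PySem.Int.floordiv (lo + hi) 2 + 1)).toNat) (by omega)
          (PySem.Int.floordiv (lo + hi) 2 + 1) hi rfl (by omega)
        omega
    · rw [dif_neg h]
      omega

-- the two bisections take identical branches, hence agree
theorem pvSearch_eq (alice bob c : List Int) (s : Nat)
    (_hlen : c.length = alice.length) (hagree : c.drop s = alice.drop s) :
    ∀ (n : Nat) (lo hi : Int), (hi - lo).toNat = n →
      (s : Int) ≤ lo → lo ≤ hi → hi < (alice.length : Int) → hi < (bob.length : Int) →
      pvASearch c bob lo hi = pvBSearch (pvPrefix alice) (pvPrefix bob) lo hi := by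
  intro n
  induction n using Nat.strong_induction_on with
  | _ n ih =>
    intro lo hi hn hs hle ha hbnd
    rw [pvASearch, pvBSearch]
    by_cases h : lo < hi
    · rw [dif_pos h, dif_pos h]
      simp only []
      have h0lo : (0 : Int) ≤ lo := le_trans (by omega) hs
      have hmb := PySem.Int.floordiv_two_mid_bounds (le_of_lt h)
      have hmlt : PySem.Int.floordiv (lo + hi) 2 < hi :=
        (PySem.Int.floordiv_lt_iff_lt_mul (by norm_num)).mpr (by omega)
      set mid := PySem.Int.floordiv (lo + hi) 2 with hmid
      rw [if_pos (show mid + 1 ≤ (bob.length : Int) by omega)]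
      rw [pvSliceAgree c alice s hagree lo (mid + 1) hs (by omega)]
      rw [pvSliceSum alice lo (mid + 1) h0lo (by omega),
          pvSliceSum bob lo (mid + 1) h0lo (by omega)]
      rw [pvPrefix_pyGetD alice (mid + 1) (by omega) (by omega),
          pvPrefix_pyGetD alice lo h0lo (by omega),
          pvPrefix_pyGetD bob (mid + 1) (by omega) (by omega),
          pvPrefix_pyGetD bob lo h0lo (by omega)]
      simp only [PySem.Int.mod_eq_emod_of_pos (by norm_num : (0:Int) < 2)]
      have hca : ((alice.take (mid + 1).toNat).sum - (alice.take lo.toNat).sum) % 2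
            ≠ ((bob.take (mid + 1).toNat).sum - (bob.take lo.toNat).sum) % 2
          ↔ ((alice.take (mid + 1).toNat).sum - (alice.take lo.toNat).sum
            + (bob.take (mid + 1).toNat).sum - (bob.take lo.toNat).sum) % 2 ≠ 0 := by
        omega
      by_cases hc : ((alice.take (mid + 1).toNat).sum - (alice.take lo.toNat).sum) % 2
            ≠ ((bob.take (mid + 1).toNat).sum - (bob.take lo.toNat).sum) % 2
      · rw [if_pos hc, if_pos (hca.mp hc)]
        exact ih ((mid - lo).toNat) (by omega) lo mid rfl hs (by omega) (by omega) (by omega)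
      · rw [if_neg hc, if_neg (fun hx => hc (hca.mpr hx))]
        exact ih ((hi - (mid + 1)).toNat) (by omega) (mid + 1) hi rfl (by omega) (by omega) ha hbnd
    · rw [dif_neg h, dif_neg h]

-- the block loops agree step by step
theorem pvFold_eq (alice bob : List Int) (block : Int) (hb : 3 ≤ block) :
    ∀ (n : Nat) (s : Int), ((alice.length : Int) - block + 1 - s).toNat = n → 0 ≤ s →
      ∀ c : List Int, c.length = alice.length → c.drop s.toNat = alice.drop s.toNat →
      (PySem.List.pyRange s ((alice.length : Int) - block + 1) block).foldl
          (pvAStep bob block) c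
        = (PySem.List.pyRange s ((alice.length : Int) - block + 1) block).foldl
          (pvBStep (pvPrefix alice) (pvPrefix bob) (bob.length : Int) block) c := by
  intro n
  induction n using Nat.strong_induction_on with
  | _ n ih =>
    intro s hn hs c hclen hcag
    by_cases hend : (alice.length : Int) - block + 1 ≤ s
    · rw [pvRange_pos_nil _ _ _ (by omega) hend]
      simp
    · rw [pvRange_pos_cons _ _ _ (by omega) (by omega)]
      simp only [List.foldl_cons]
      have hsb : s + block ≤ (alice.length : Int) := by omega
      -- the two step functions produce the same next state c'
      have hstep : pvAStep bob block c s
          = pvBStep (pvPrefix alice) (pvPrefix bob) (bob.length : Int) block c s := by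
        unfold pvAStep pvBStep
        simp only []
        rw [hclen, min_eq_left hsb]
        by_cases hm : s + block > (bob.length : Int)
        · rw [if_pos hm, if_neg (show ¬(s + block ≤ (bob.length : Int)) by omega)]
          rw [if_neg (by simp)]
        · rw [if_neg hm, if_pos (show s + block ≤ (bob.length : Int) by omega)]
          rw [pvSliceAgree c alice s.toNat hcag s (s + block) (by omega) (by omega)]
          rw [pvSliceSum alice s (s + block) hs (by omega),
              pvSliceSum bob s (s + block) hs (by omega)]
          rw [pvPrefix_pyGetD alice (s + block) (by omega) (by omega),
              pvPrefix_pyGetD alice s hs (by omega),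
              pvPrefix_pyGetD bob (s + block) (by omega) (by omega),
              pvPrefix_pyGetD bob s hs (by omega)]
          simp only [PySem.Int.mod_eq_emod_of_pos (by norm_num : (0:Int) < 2)]
          have hca : (((alice.take (s + block).toNat).sum - (alice.take s.toNat).sum) % 2
                ≠ ((bob.take (s + block).toNat).sum - (bob.take s.toNat).sum) % 2
                ∧ s + block - s > 0)
              ↔ ¬(((alice.take (s + block).toNat).sum - (alice.take s.toNat).sum
                + (bob.take (s + block).toNat).sum - (bob.take s.toNat).sum) % 2 = 0) := by
            constructor
            · intro hx; omega
            · intro hx; exact ⟨by omega, by omega⟩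
          by_cases hc : ((alice.take (s + block).toNat).sum - (alice.take s.toNat).sum) % 2
                ≠ ((bob.take (s + block).toNat).sum - (bob.take s.toNat).sum) % 2
                ∧ s + block - s > 0
          · rw [if_pos hc, if_neg (hca.mp hc)]
            rw [pvSearch_eq alice bob c s.toNat hclen hcag ((s + block - 1 - s).toNat)
              s (s + block - 1) rfl (by omega) (by omega) (by omega) (by omega)]
          · rw [if_neg hc, if_pos (by by_contra hx; exact hc (hca.mpr hx))]
      rw [hstep]
      -- the new state satisfies the invariant at s + block
      have hbnd := pvBSearch_bounds (pvPrefix alice) (pvPrefix bob)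
        ((s + block - 1 - s).toNat) s (s + block - 1) rfl (by omega)
      have hnext : ∀ c' : List Int, c' = pvBStep (pvPrefix alice) (pvPrefix bob)
            (bob.length : Int) block c s →
          c'.length = alice.length ∧ c'.drop (s + block).toNat = alice.drop (s + block).toNat := by
        intro c' hc'
        unfold pvBStep at hc'
        simp only [] at hc'
        have hmono := pvDropAgreeMono c alice s.toNat (s + block).toNat (by omega) hcag
        split at hc'
        · exact hc' ▸ ⟨hclen, hmono⟩
        · split at hc'
          · exact hc' ▸ ⟨hclen, hmono⟩
          · rw [hc', PySem.List.pySetD_of_nonneg _ _ (by omega)]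
            refine ⟨by simpa using hclen, ?_⟩
            rw [List.drop_set, if_pos (by omega)]
            exact hmono
      obtain ⟨hlen', hag'⟩ := hnext _ rfl
      have := ih (((alice.length : Int) - block + 1 - (s + block)).toNat) (by omega)
        (s + block) rfl (by omega) _ hlen' hag'
      exact this

-- ===== VERDICT (by name: the statement is the Claim_ definition above) =====
theorem cascade_error_correct_py_spec : Claim_equal_cascade_error_correct_py := by
  intro alice bob _
  unfold Spec_cascade_error_correct_py cascade_error_correct_py cascade_error_correct_py_alt
  exact pvFold_eq alice bob _ (le_max_left _ _) _ 0 rfl le_rfl alice rfl rfl
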